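-- pv_equiv track=rewrite | github.com/manbo91/coding-interview-problems | 21-30/25_witness_of_the_tall_people.py | witnesses
-- ===== SOURCE A (Python) =====
-- def witnesses(heights):
--     count = 0
--     max_taller = 0
--     for i in range(len(heights) - 1, -1, -1):
--         current_height = heights[i]
--         if current_height > max_taller:
--             count += 1
--             max_taller = current_height
--     return count
-- ===== SOURCE B (Python) =====
-- def witnesses(heights):
--     # Suffix-maximum table (seeded with 0, matching A's "taller than 0" baseline),
--     # then a separate counting pass.
--     suf = [0]
--     for h in reversed(heights):
--         suf.append(max(suf[-1], h))
--     suf.reverse()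
--     return sum(1 for h, s in zip(heights, suf[1:]) if h > s)
-- ===== Notes on version B (the rewrite author's own statement) =====
-- stated objective: alternative
-- what changed: B materializes a suffix-maximum table in one pass and then counts, in a separate zip pass, the elements strictly greater than the suffix maximum to their right, instead of A's single fused backward loop with running max and counter.
import Mathlib
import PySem

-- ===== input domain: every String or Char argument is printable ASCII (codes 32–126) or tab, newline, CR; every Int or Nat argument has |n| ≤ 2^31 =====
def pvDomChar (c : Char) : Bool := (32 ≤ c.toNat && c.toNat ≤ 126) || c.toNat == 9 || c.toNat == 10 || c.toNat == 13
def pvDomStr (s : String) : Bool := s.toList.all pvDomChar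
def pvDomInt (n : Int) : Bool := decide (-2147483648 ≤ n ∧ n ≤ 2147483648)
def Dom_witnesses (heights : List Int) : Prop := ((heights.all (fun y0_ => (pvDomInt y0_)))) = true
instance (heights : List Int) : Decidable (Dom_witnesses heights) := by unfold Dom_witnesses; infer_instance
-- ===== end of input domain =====

-- B replaces A's fused backward counting loop with a suffix-maximum table pass plus a separate counting pass (alternative decomposition, same cost).
-- ===== PORT A =====
-- count=0; max_taller=0; for i in range(len-1,-1,-1): update -- literal backward index loop
def witnesses (heights : List Int) : Int :=
  ((PySem.List.pyRange (PySem.List.len heights - 1) (-1) (-1)).foldl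
    (fun (s : Int × Int) (i : Int) =>
      -- heights[i]; i is always in range in this loop, so pyGetD is exact here
      let current_height := PySem.List.pyGetD heights i 0
      if current_height > s.2 then (s.1 + 1, current_height) else s)
    ((0 : Int), (0 : Int))).1

-- ===== PORT B =====
-- Source B: build the suffix-max table suf (suf[i] = max(0, heights[i:])), then count h > suf[i+1]
def witnesses_alt (heights : List Int) : Int :=
  let suf : List Int := heights.foldr (fun h acc => (max (acc.headD 0) h) :: acc) [0]
  ((heights.zip suf.tail).countP (fun p => decide (p.2 < p.1)) : Int)

-- ===== PRECONDITION & SPEC =====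
def Spec_witnesses (heights : List Int) (out : Int) : Prop := out = witnesses_alt heights
instance (heights : List Int) (out : Int) : Decidable (Spec_witnesses heights out) := by unfold Spec_witnesses; infer_instance

-- ===== CLAIM (what is proved, stated in full; the proofs are below) =====
def Claim_equal_witnesses : Prop := ∀ (heights : List Int), Dom_witnesses heights → Spec_witnesses heights (witnesses heights)

-- ===== LEMMAS AND PROOFS =====

-- ===== VERDICT (by name: the statement is the Claim_ definition above) =====
-- suffix max of hs seeded with m (A's running max over the suffix)
def sufM (hs : List Int) (m : Int) : Int := hs.foldr (fun h a => max a h) m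

-- A's per-element state step
def stepA (s : Int × Int) (h : Int) : Int × Int :=
  if h > s.2 then (s.1 + 1, h) else s

-- A's loop over descending indices equals a foldr over the list itself
lemma foldA_eq (hs : List Int) (s : Int × Int) :
    (PySem.List.pyRange ((hs.length : Int) - 1) (-1) (-1)).foldl
      (fun (s : Int × Int) (i : Int) => stepA s (PySem.List.pyGetD hs i 0)) s
    = hs.foldr (fun h s => stepA s h) s := by
  induction hs using List.reverseRecOn generalizing s with
  | nil => simp [PySem.List.pyRange_neg_one_eq_nil]
  | append_singleton t x ih =>
    rw [PySem.List.pyRange_neg_one_cons (by simp; omega)]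
    simp only [List.foldl_cons, List.foldr_append, List.foldr_cons, List.foldr_nil]
    have hx : PySem.List.pyGetD (t ++ [x]) ((↑(t ++ [x]).length : Int) - 1) 0 = x := by
      rw [PySem.List.pyGetD_eq_getElem _ _ (by simp) (by simp)]
      simp
    rw [hx]
    have hcongr :
        (PySem.List.pyRange ((↑(t ++ [x]).length : Int) - 1 - 1) (-1) (-1)).foldl
          (fun (s : Int × Int) (i : Int) => stepA s (PySem.List.pyGetD (t ++ [x]) i 0)) (stepA s x)
        = (PySem.List.pyRange ((↑t.length : Int) - 1) (-1) (-1)).foldl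
          (fun (s : Int × Int) (i : Int) => stepA s (PySem.List.pyGetD t i 0)) (stepA s x) := by
      have hr : ((↑(t ++ [x]).length : Int) - 1 - 1) = ((↑t.length : Int) - 1) := by
        simp
      rw [hr]
      refine PySem.List.foldl_congr_mem _ _ _ _ (fun acc i hi => ?_)
      rw [PySem.List.mem_pyRange_neg_one] at hi
      have h0 : 0 ≤ i := by omega
      have h1 : i < (t.length : Int) := by omega
      rw [PySem.List.pyGetD_eq_getElem _ _ h0 (by simp; omega),
          PySem.List.pyGetD_eq_getElem _ _ h0 h1]
      rw [List.getElem_append_left (by omega)]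
    rw [hcongr, ih]

-- the second state component of A's foldr is the running max seeded with m
lemma foldr_snd (hs : List Int) (c m : Int) :
    (hs.foldr (fun h s => stepA s h) (c, m)).2 = sufM hs m := by
  induction hs with
  | nil => simp [sufM]
  | cons h t ih =>
    rw [List.foldr_cons]
    have hm : sufM (h :: t) m = max (sufM t m) h := by simp [sufM]
    rw [hm]
    rcases hst : t.foldr (fun h s => stepA s h) (c, m) with ⟨a, b⟩
    rw [hst] at ih
    simp only [stepA]
    split_ifs with h1 <;> simp at ih ⊢ <;> omega

-- length of the suffix table
lemma suf_length (hs : List Int) :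
    (hs.foldr (fun h acc => (max (acc.headD 0) h) :: acc) [0]).length = hs.length + 1 := by
  induction hs with
  | nil => simp
  | cons a b ihb => simp only [List.foldr_cons, List.length_cons, ihb]

-- head of the suffix table is the suffix max seeded with 0
lemma suf_head (hs : List Int) :
    (hs.foldr (fun h acc => (max (acc.headD 0) h) :: acc) [0]).headD 0 = sufM hs 0 := by
  induction hs with
  | nil => simp [sufM]
  | cons h t ih => simp only [List.foldr_cons, List.headD_cons, ih, sufM]

-- B's count, recursive characterisation
lemma alt_cons (h : Int) (t : List Int) :
    witnesses_alt (h :: t) =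
      (if sufM t 0 < h then 1 else 0) + witnesses_alt t := by
  simp only [witnesses_alt, List.foldr_cons, List.tail_cons]
  cases ht : t.foldr (fun h acc => (max (acc.headD 0) h) :: acc) [0] with
  | nil =>
    exfalso
    have := suf_length t
    rw [ht] at this; simp at this
  | cons s rest =>
    have hs' : s = sufM t 0 := by
      have := suf_head t; rw [ht] at this; simpa using this
    subst hs'
    simp only [List.zip_cons_cons, List.countP_cons, List.tail_cons]
    by_cases hlt : sufM t 0 < h
    · simp [hlt]; ring
    · simp [hlt]

-- A's count equals B's count
lemma countA_eq (hs : List Int) :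
    (hs.foldr (fun h s => stepA s h) ((0 : Int), (0 : Int))).1 = witnesses_alt hs := by
  induction hs with
  | nil => decide
  | cons h t ih =>
    rw [alt_cons, List.foldr_cons]
    have h2 := foldr_snd t 0 0
    rcases hst : t.foldr (fun h s => stepA s h) ((0 : Int), (0 : Int)) with ⟨a, b⟩
    rw [hst] at ih h2
    simp only [stepA]
    split_ifs with h1 h3 h3 <;> (try simp at ih h2 ⊢) <;> omega

-- ===== VERDICT (by name: the statement is the Claim_ definition above) =====
theorem witnesses_spec : Claim_equal_witnesses := by
  intro heights _
  show witnesses heights = witnesses_alt heights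
  unfold witnesses
  have hfun : (fun (s : Int × Int) (i : Int) =>
      let current_height := PySem.List.pyGetD heights i 0
      if current_height > s.2 then (s.1 + 1, current_height) else s)
      = (fun (s : Int × Int) (i : Int) => stepA s (PySem.List.pyGetD heights i 0)) := by
    funext s i; simp [stepA]
  rw [PySem.List.len_eq, hfun, foldA_eq, countA_eq]
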